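-- pv_equiv track=rewrite | github.com/XyzHuy/-DL-Fine-tuning-coding-model | data/solution/Solution3207.py | maximumPoints
-- ===== SOURCE A (Python) =====
-- from typing import List
--
-- def maximumPoints(enemyEnergies: List[int], currentEnergy: int) -> int:
--     enemyEnergies.sort()
--     if currentEnergy < enemyEnergies[0]:
--         return 0
--     ans = 0
--     for i in range(len(enemyEnergies) - 1, -1, -1):
--         ans += currentEnergy // enemyEnergies[0]
--         currentEnergy %= enemyEnergies[0]
--         currentEnergy += enemyEnergies[i]
--     return ans
-- ===== SOURCE B (Python) =====
-- def maximumPoints(enemyEnergies, currentEnergy):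
--     m = min(enemyEnergies)
--     if currentEnergy < m:
--         return 0
--     return (currentEnergy + sum(enemyEnergies) - m) // m
-- ===== Notes on version B (the rewrite author's own statement) =====
-- stated objective: faster
-- what changed: Replaced A's sort plus backwards remainder-carrying loop by a closed form: since every division uses the minimum, the answer is (currentEnergy + sum(enemyEnergies) - min) // min after the same guard, using min and sum in one pass and no sort.
import Mathlib
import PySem

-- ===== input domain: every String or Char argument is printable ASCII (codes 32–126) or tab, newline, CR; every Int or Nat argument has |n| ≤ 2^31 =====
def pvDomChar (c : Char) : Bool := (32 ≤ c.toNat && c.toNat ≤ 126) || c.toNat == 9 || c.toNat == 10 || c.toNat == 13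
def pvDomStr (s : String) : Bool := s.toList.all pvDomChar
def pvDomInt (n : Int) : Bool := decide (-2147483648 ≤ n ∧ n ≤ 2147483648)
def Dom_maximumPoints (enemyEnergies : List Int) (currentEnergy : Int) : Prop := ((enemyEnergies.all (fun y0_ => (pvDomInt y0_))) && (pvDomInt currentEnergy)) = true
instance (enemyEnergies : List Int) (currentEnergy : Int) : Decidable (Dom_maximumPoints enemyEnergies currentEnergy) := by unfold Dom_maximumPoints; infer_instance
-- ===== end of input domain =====

-- B replaces A's sort + O(n) remainder-carrying loop by the closed form
-- (currentEnergy + sum - min) // min; the proof is about the RETURN value only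
-- (A additionally sorts its argument list in place, B does not mutate it).

-- ===== PORT A =====
-- literal port of A: sort, IndexError on [], then the backwards loop
-- carrying (ans, currentEnergy); pyGet?/pyGetD none-default cases are exactly
-- where Python raises (excluded by Pre_).
def maximumPoints (enemyEnergies : List Int) (currentEnergy : Int) : Int :=
  let s := PySem.List.sorted enemyEnergies (fun x => x) false
  match PySem.List.pyGet? s 0 with
  | none => 0  -- IndexError on the empty list: outside Pre_
  | some m0 =>
    if currentEnergy < m0 then 0
    else
      ((PySem.List.pyRange ((s.length : Int) - 1) (-1) (-1)).foldl
        (fun (st : Int × Int) i =>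
          (st.1 + PySem.Int.floordiv st.2 (PySem.List.pyGetD s 0 0),
           PySem.Int.mod st.2 (PySem.List.pyGetD s 0 0) + PySem.List.pyGetD s i 0))
        (0, currentEnergy)).1

-- ===== PORT B =====
-- literal port of B: min, guard, one floor division.
def maximumPoints_alt (enemyEnergies : List Int) (currentEnergy : Int) : Int :=
  match PySem.List.min? enemyEnergies (fun x => x) with
  | none => 0  -- ValueError of min([]) : outside Pre_
  | some m =>
    if currentEnergy < m then 0
    else PySem.Int.floordiv (currentEnergy + enemyEnergies.sum - m) m

-- ===== PRECONDITION & SPEC =====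
-- Pre_ excludes exactly the inputs where the Python A raises: the empty list
-- (IndexError) and lists whose minimum is 0 while currentEnergy ≥ 0
-- (ZeroDivisionError); B raises on the same inputs.
def Pre_maximumPoints (enemyEnergies : List Int) (currentEnergy : Int) : Prop :=
  enemyEnergies ≠ [] ∧ ((0 ∈ enemyEnergies ∧ ∀ x ∈ enemyEnergies, 0 ≤ x) → currentEnergy < 0)
instance (enemyEnergies : List Int) (currentEnergy : Int) : Decidable (Pre_maximumPoints enemyEnergies currentEnergy) := by unfold Pre_maximumPoints; infer_instance

def pvWitness_maximumPoints : List Int × Int := ([3, 2, 2], 7)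

def Spec_maximumPoints (enemyEnergies : List Int) (currentEnergy : Int) (out : Int) : Prop := out = maximumPoints_alt enemyEnergies currentEnergy
instance (enemyEnergies : List Int) (currentEnergy : Int) (out : Int) : Decidable (Spec_maximumPoints enemyEnergies currentEnergy out) := by unfold Spec_maximumPoints; infer_instance

-- ===== CLAIM (what is proved, stated in full; the proofs are below) =====
def Claim_equal_maximumPoints : Prop := ∀ (enemyEnergies : List Int) (currentEnergy : Int), Dom_maximumPoints enemyEnergies currentEnergy → Pre_maximumPoints enemyEnergies currentEnergy → Spec_maximumPoints enemyEnergies currentEnergy (maximumPoints enemyEnergies currentEnergy)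

-- ===== LEMMAS AND PROOFS =====

-- remainder carry: dividing c, keeping c % m, adding x and dividing again is
-- one division of c + x (any nonzero m, Python floor semantics)
theorem pv_carry (m c x : Int) (hm : m ≠ 0) :
    PySem.Int.floordiv c m + PySem.Int.floordiv (PySem.Int.mod c m + x) m
      = PySem.Int.floordiv (c + x) m := by
  have hmod : PySem.Int.mod c m = c - PySem.Int.floordiv c m * m := by
    have := PySem.Int.floordiv_mul_add_mod c m; omega
  simp only [PySem.Int.floordiv] at *
  have : c - c.fdiv m * m + x = (c + x) + (-(c.fdiv m)) * m := by ring
  rw [hmod, this, Int.add_mul_fdiv_right _ _ hm]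
  omega

-- A's loop over a nonempty list vs of enemy values: the result is one floor
-- division of c plus all values but the last (the last addition is dead).
theorem pv_loop (m : Int) (hm : m ≠ 0) :
    ∀ (vs : List Int), vs ≠ [] → ∀ (a c : Int),
      (vs.foldl (fun (st : Int × Int) v =>
          (st.1 + PySem.Int.floordiv st.2 m, PySem.Int.mod st.2 m + v)) (a, c)).1
        = a + PySem.Int.floordiv (c + vs.dropLast.sum) m := by
  intro vs
  induction vs with
  | nil => intro h; exact absurd rfl h
  | cons v vs ih =>
    intro _ a c
    cases vs with
    | nil => simp [List.foldl]
    | cons w ws =>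
      rw [List.foldl_cons, ih (by simp)]
      simp only [List.dropLast_cons_of_ne_nil (List.cons_ne_nil w ws), List.sum_cons]
      rw [add_assoc, ← pv_carry m c (v + ((w :: ws).dropLast.sum)) hm]
      ring_nf

-- the index range of A's loop fetches exactly the sorted list reversed
theorem pv_indices (s : List Int) (hs : s ≠ []) :
    (PySem.List.pyRange ((s.length : Int) - 1) (-1) (-1)).map
        (fun i => PySem.List.pyGetD s i 0) = s.reverse := by
  have hn : 0 < s.length := List.length_pos_iff.mpr hs
  have hrange : PySem.List.pyRange ((s.length : Int) - 1) (-1) (-1)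
      = (List.range s.length).map (fun (k : Nat) => ((s.length : Int) - 1) + (-1) * (k : Int)) := by
    simp only [PySem.List.pyRange]
    rw [if_neg (by decide : ¬((-1 : Int) = 0))]
    simp only [if_neg (by decide : ¬((0:Int) < -1)), if_pos (by omega : (-1 : Int) < (s.length : Int) - 1)]
    have : (((s.length : Int) - 1 - (-1) + -(-1) - 1) / -(-1)).toNat = s.length := by
      simp
    rw [this]
  rw [hrange, List.map_map]
  apply List.ext_getElem
  · simp
  · intro q hq hq'
    simp only [List.getElem_map, List.getElem_range, Function.comp_apply,
      List.getElem_reverse]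
    have hqlt : q < s.length := by simpa using hq
    have hi0 : (0 : Int) ≤ (s.length : Int) - 1 + (-1) * (q : Int) := by omega
    have hi1 : (s.length : Int) - 1 + (-1) * (q : Int) < (s.length : Int) := by omega
    rw [PySem.List.pyGetD_eq_getElem s 0 hi0 hi1]
    congr 1
    omega

-- min? of a nonempty list is some
theorem pv_min?_isSome {α κ : Type} [LT κ] [DecidableLT κ]
    (xs : List α) (key : α → κ) (h : xs ≠ []) :
    (PySem.List.min? xs key).isSome := by
  cases xs with
  | nil => exact absurd rfl h
  | cons x xs =>
    simp only [PySem.List.min?, List.foldl_cons]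
    clear h
    induction xs generalizing x with
    | nil => simp
    | cons y ys ih =>
      simp only [List.foldl_cons]
      by_cases hk : key y < key x
      · simp only [if_pos hk]; exact ih y
      · simp only [if_neg hk]; exact ih x

-- ===== VERDICT (by name: the statement is the Claim_ definition above) =====
theorem maximumPoints_spec : Claim_equal_maximumPoints := by
  intro xs E _hdom hpre
  obtain ⟨hne, hzero⟩ := hpre
  unfold Spec_maximumPoints maximumPoints maximumPoints_alt
  -- the sorted list is nonempty
  have hsne : PySem.List.sorted xs (fun x => x) false ≠ [] := by
    intro h; exact hne ((PySem.List.sorted_eq_nil_iff xs _ false).mp h)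
  obtain ⟨m, t, hs⟩ : ∃ m t, PySem.List.sorted xs (fun x => x) false = m :: t := by
    cases h : PySem.List.sorted xs (fun x => x) false with
    | nil => exact absurd h hsne
    | cons a l => exact ⟨a, l, rfl⟩
  -- m is a minimum of xs
  have hmmem : m ∈ xs := by
    have := (PySem.List.sorted_perm xs (fun x => x) false).mem_iff (a := m)
    rw [hs] at this; exact this.mp (by simp)
  have hmle : ∀ y ∈ xs, m ≤ y := PySem.List.key_head_sorted_le xs (fun x => x) hs
  -- B's min agrees with m
  obtain ⟨mb, hmb⟩ : ∃ mb, PySem.List.min? xs (fun x => x) = some mb := by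
    have := pv_min?_isSome xs (fun x => x) hne
    cases h : PySem.List.min? xs (fun x => x) with
    | none => rw [h] at this; simp at this
    | some v => exact ⟨v, rfl⟩
  have hmbm : mb = m :=
    le_antisymm (PySem.List.min?_isMin hmb m hmmem) (hmle mb (PySem.List.min?_mem hmb))
  simp only [hs, hmb, hmbm]
  have hget : PySem.List.pyGet? (m :: t) 0 = some m := by
    simp [PySem.List.pyGet?, PySem.List.pyIdx?]
  have hgetD : PySem.List.pyGetD (m :: t) 0 0 = m := by
    simp [PySem.List.pyGetD, PySem.List.pyGet?, PySem.List.pyIdx?]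
  rw [hget]
  by_cases hlt : E < m
  · simp [hlt]
  · simp only [if_neg hlt]
    -- m ≠ 0 : otherwise Pre_ forces E < 0 ≤ m, contradicting ¬ E < m
    have hm0 : m ≠ 0 := by
      intro h0
      subst h0
      exact absurd (hzero ⟨hmmem, fun x hx => hmle x hx⟩) (by omega)
    -- rewrite the loop over indices as a loop over the reversed sorted values
    have hsum : xs.sum = m + t.sum := by
      have := (PySem.List.sorted_perm xs (fun x => x) false).sum_eq
      rw [hs] at this; simp at this; omega
    rw [show (fun (st : Int × Int) i =>
          (st.1 + PySem.Int.floordiv st.2 (PySem.List.pyGetD (m :: t) 0 0),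
           PySem.Int.mod st.2 (PySem.List.pyGetD (m :: t) 0 0) + PySem.List.pyGetD (m :: t) i 0))
        = (fun (st : Int × Int) i =>
          (st.1 + PySem.Int.floordiv st.2 m,
           PySem.Int.mod st.2 m + PySem.List.pyGetD (m :: t) i 0)) from by
      funext st i; rw [hgetD]]
    rw [show ((PySem.List.pyRange (((m :: t).length : Int) - 1) (-1) (-1)).foldl
        (fun (st : Int × Int) i =>
          (st.1 + PySem.Int.floordiv st.2 m,
           PySem.Int.mod st.2 m + PySem.List.pyGetD (m :: t) i 0)) (0, E))
      = (((PySem.List.pyRange (((m :: t).length : Int) - 1) (-1) (-1)).map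
          (fun i => PySem.List.pyGetD (m :: t) i 0)).foldl
        (fun (st : Int × Int) v =>
          (st.1 + PySem.Int.floordiv st.2 m, PySem.Int.mod st.2 m + v)) (0, E)) from
      (List.foldl_map (f := fun i => PySem.List.pyGetD (m :: t) i 0)
        (g := fun (st : Int × Int) v =>
          (st.1 + PySem.Int.floordiv st.2 m, PySem.Int.mod st.2 m + v))).symm]
    rw [pv_indices (m :: t) (by simp)]
    rw [pv_loop m hm0 (m :: t).reverse (by simp) 0 E]
    have hrev : (m :: t).reverse.dropLast = t.reverse := by
      rw [List.reverse_cons, List.dropLast_concat]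
    rw [hrev]
    simp only [List.sum_reverse, zero_add]
    congr 1
    omega
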